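-- pv_equiv track=rewrite | github.com/rbiswasfc/kaggle-feedback-effectiveness-3rd-place-solution | code/src/fpe_longformer/longformer_dataloader.py | build_multitask_labels
-- ===== SOURCE A (Python) =====
-- def build_multitask_labels(label_sequence):
--     """
--     aux_label_0: 0 if ineffective, 1 if adequate, 1 if effective
--     aux_label_1: 0 if ineffective, 0 if adequate, 1 if effective
--     aux_label_2: 1 if cur_label > prev_label # is_better
--     aux_label_3: 1 if cur_label < prev_label # is_worse
--     """
--     to_return = []
--
--     def _get_additional_labels(label_id):
--         if label_id == 0:
--             vec = [0, 0]
--         elif label_id == 1: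
--             vec = [1, 0]
--         elif label_id == 2:
--             vec = [1, 1]
--         elif label_id == -1:
--             vec = [-1, -1]
--         else:
--             raise
--         return vec
--
--     def _is_better(prev, curr):
--         if (curr == -1) | (prev == -1):
--             return -1
--         if curr > prev:
--             return 1
--         else:
--             return 0
--
--     def _is_worse(prev, curr):
--         if (curr == -1) | (prev == -1):
--             return -1
--         if curr < prev:
--             return 1
--         else:
--             return 0
--
--     prev_label = -1
--     for cur_label in label_sequence:
--         cur_multitask_label = []
--         cur_multitask_label.extend(_get_additional_labels(cur_label))
--         # is_better
--         cur_multitask_label.append(_is_better(cur_label, prev_label))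
--         # is_worse
--         cur_multitask_label.append(_is_worse(cur_label, prev_label))
--         prev_label = cur_label
--         to_return.append(cur_multitask_label)
--     return to_return
-- ===== SOURCE B (Python) =====
-- _COL0 = {0: 0, 1: 1, 2: 1, -1: -1}
-- _COL1 = {0: 0, 1: 0, 2: 1, -1: -1}
--
--
-- def build_multitask_labels(label_sequence):
--     # Columnar construction: compute each of the four label columns in its own
--     # pass, then transpose the columns into per-element rows.
--     col0 = [_COL0[x] for x in label_sequence]
--     col1 = [_COL1[x] for x in label_sequence]
--     pairs = list(zip([-1] + list(label_sequence[:-1]), label_sequence))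
--     better = [-1 if (p == -1 or c == -1) else int(p > c) for p, c in pairs]
--     worse = [-1 if (p == -1 or c == -1) else int(p < c) for p, c in pairs]
--     return [list(row) for row in zip(col0, col1, better, worse)]
-- ===== Notes on version B (the rewrite author's own statement) =====
-- stated objective: alternative
-- what changed: Replaces A's single stateful loop (mutable prev_label, per-row helper calls) with a columnar construction: four independent column passes (two maps over the labels, two over the shifted adjacent-pair list) transposed into per-element rows at the end.
import Mathlib
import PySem

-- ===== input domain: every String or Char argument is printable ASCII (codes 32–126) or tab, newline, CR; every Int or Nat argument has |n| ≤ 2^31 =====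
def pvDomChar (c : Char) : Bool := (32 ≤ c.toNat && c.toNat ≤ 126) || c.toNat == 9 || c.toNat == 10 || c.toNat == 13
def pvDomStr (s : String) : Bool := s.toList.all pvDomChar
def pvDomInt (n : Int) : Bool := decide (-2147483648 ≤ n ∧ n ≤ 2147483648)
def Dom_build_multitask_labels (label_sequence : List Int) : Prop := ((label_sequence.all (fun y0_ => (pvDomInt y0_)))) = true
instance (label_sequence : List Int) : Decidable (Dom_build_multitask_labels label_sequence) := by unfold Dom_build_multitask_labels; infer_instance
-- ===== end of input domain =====

-- B replaces A's single stateful loop with four independent column passes transposed into rows (objective: alternative).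

-- ===== PORT A =====
-- A's `else: raise` branch (labels outside {0,1,2,-1}) raises RuntimeError; excluded by Pre_; the port returns [] there.
def pvGetAdditionalLabels (label_id : Int) : List Int :=
  if label_id = 0 then [0, 0]
  else if label_id = 1 then [1, 0]
  else if label_id = 2 then [1, 1]
  else if label_id = -1 then [-1, -1]
  else []

def pvIsBetter (prev curr : Int) : Int :=
  if curr = -1 ∨ prev = -1 then -1
  else if curr > prev then 1 else 0

def pvIsWorse (prev curr : Int) : Int :=
  if curr = -1 ∨ prev = -1 then -1
  else if curr < prev then 1 else 0

def build_multitask_labels (label_sequence : List Int) : List (List Int) :=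
  (label_sequence.foldl
    (fun (st : List (List Int) × Int) cur_label =>
      (st.1 ++ [pvGetAdditionalLabels cur_label ++
                  [pvIsBetter cur_label st.2, pvIsWorse cur_label st.2]],
       cur_label))
    (([] : List (List Int)), (-1 : Int))).1

-- ===== PORT B =====
-- `_COL0[x]` / `_COL1[x]` raise KeyError for labels outside {0,1,2,-1}; the port defaults to 0 there (excluded by Pre_).
def pvTblCol0 : PySem.Dict Int Int := PySem.Dict.ofList [(0, 0), (1, 1), (2, 1), (-1, -1)]
def pvTblCol1 : PySem.Dict Int Int := PySem.Dict.ofList [(0, 0), (1, 0), (2, 1), (-1, -1)]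

def pvCol0 (ls : List Int) : List Int :=
  ls.map (fun x => PySem.Dict.getD pvTblCol0 x 0)

def pvCol1 (ls : List Int) : List Int :=
  ls.map (fun x => PySem.Dict.getD pvTblCol1 x 0)

def pvPairs (ls : List Int) : List (Int × Int) :=
  ((-1 : Int) :: ls.dropLast).zip ls

def pvBetterCol (ls : List Int) : List Int :=
  (pvPairs ls).map (fun pc => if pc.1 = -1 ∨ pc.2 = -1 then -1 else if pc.1 > pc.2 then 1 else 0)

def pvWorseCol (ls : List Int) : List Int :=
  (pvPairs ls).map (fun pc => if pc.1 = -1 ∨ pc.2 = -1 then -1 else if pc.1 < pc.2 then 1 else 0)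

def build_multitask_labels_alt (label_sequence : List Int) : List (List Int) :=
  ((pvCol0 label_sequence).zip ((pvCol1 label_sequence).zip
    ((pvBetterCol label_sequence).zip (pvWorseCol label_sequence)))).map
    (fun r => [r.1, r.2.1, r.2.2.1, r.2.2.2])

-- ===== PRECONDITION & SPEC =====
-- Pre_ excludes sequences with a label outside {0,1,2,-1}: A's bare `raise` fires there (RuntimeError).
def Pre_build_multitask_labels (label_sequence : List Int) : Prop :=
  ∀ x ∈ label_sequence, x = 0 ∨ x = 1 ∨ x = 2 ∨ x = -1
instance (label_sequence : List Int) : Decidable (Pre_build_multitask_labels label_sequence) := by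
  unfold Pre_build_multitask_labels; infer_instance

def pvWitness_build_multitask_labels : List Int := [2, 1, 0, -1, 2, 2, 1]

def Spec_build_multitask_labels (label_sequence : List Int) (out : List (List Int)) : Prop := out = build_multitask_labels_alt label_sequence
instance (label_sequence : List Int) (out : List (List Int)) : Decidable (Spec_build_multitask_labels label_sequence out) := by unfold Spec_build_multitask_labels; infer_instance

-- ===== CLAIM (what is proved, stated in full; the proofs are below) =====
def Claim_equal_build_multitask_labels : Prop := ∀ (label_sequence : List Int), Dom_build_multitask_labels label_sequence → Pre_build_multitask_labels label_sequence → Spec_build_multitask_labels label_sequence (build_multitask_labels label_sequence)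

-- ===== LEMMAS AND PROOFS =====

-- B's transpose, generalised over the previous label feeding the pair columns (proof helper).
def pvAltFrom (prev : Int) (ls : List Int) : List (List Int) :=
  ((pvCol0 ls).zip ((pvCol1 ls).zip
    ((((prev :: ls.dropLast).zip ls).map (fun pc => if pc.1 = -1 ∨ pc.2 = -1 then -1 else if pc.1 > pc.2 then 1 else 0)).zip
     (((prev :: ls.dropLast).zip ls).map (fun pc => if pc.1 = -1 ∨ pc.2 = -1 then -1 else if pc.1 < pc.2 then 1 else 0))))).map
    (fun r => [r.1, r.2.1, r.2.2.1, r.2.2.2])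

theorem pvShiftZip (prev c : Int) (ls : List Int) :
    (prev :: (c :: ls).dropLast).zip (c :: ls)
      = (prev, c) :: ((c :: ls.dropLast).zip ls) := by
  cases ls <;> simp

theorem pvAltFrom_cons (prev c : Int) (ls : List Int) :
    pvAltFrom prev (c :: ls)
      = [PySem.Dict.getD pvTblCol0 c 0,
         PySem.Dict.getD pvTblCol1 c 0,
         if prev = -1 ∨ c = -1 then -1 else if prev > c then 1 else 0,
         if prev = -1 ∨ c = -1 then -1 else if prev < c then 1 else 0]
        :: pvAltFrom c ls := by
  unfold pvAltFrom
  rw [pvShiftZip]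
  simp [pvCol0, pvCol1]

-- one A-row equals one B-row, for any admissible current label
theorem pvRow_eq (prev cur : Int)
    (h : cur = 0 ∨ cur = 1 ∨ cur = 2 ∨ cur = -1) :
    pvGetAdditionalLabels cur ++ [pvIsBetter cur prev, pvIsWorse cur prev]
      = [PySem.Dict.getD pvTblCol0 cur 0,
         PySem.Dict.getD pvTblCol1 cur 0,
         if prev = -1 ∨ cur = -1 then -1 else if prev > cur then 1 else 0,
         if prev = -1 ∨ cur = -1 then -1 else if prev < cur then 1 else 0] := by
  rcases h with h | h | h | h <;> subst h <;> by_cases hp : prev = -1 <;>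
    simp [pvGetAdditionalLabels, pvIsBetter, pvIsWorse, pvTblCol0, pvTblCol1, PySem.Dict.getD, hp] <;> decide

theorem pvLoop_eq (ls : List Int) (prev : Int) (acc : List (List Int))
    (h : ∀ x ∈ ls, x = 0 ∨ x = 1 ∨ x = 2 ∨ x = -1) :
    (ls.foldl
      (fun (st : List (List Int) × Int) cur_label =>
        (st.1 ++ [pvGetAdditionalLabels cur_label ++
                    [pvIsBetter cur_label st.2, pvIsWorse cur_label st.2]],
         cur_label)) (acc, prev)).1
    = acc ++ pvAltFrom prev ls := by
  induction ls generalizing prev acc with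
  | nil => simp [pvAltFrom, pvCol0, pvCol1]
  | cons c tl ih =>
    have hc : c = 0 ∨ c = 1 ∨ c = 2 ∨ c = -1 := h c (by simp)
    rw [pvAltFrom_cons]
    simp only [List.foldl_cons]
    rw [ih c _ (fun x hx => h x (by simp [hx]))]
    simp [pvRow_eq prev c hc]

-- ===== VERDICT (by name: the statement is the Claim_ definition above) =====
theorem build_multitask_labels_spec : Claim_equal_build_multitask_labels := by
  intro ls _ hpre
  unfold Spec_build_multitask_labels build_multitask_labels
  have : build_multitask_labels_alt ls = pvAltFrom (-1) ls := by
    unfold build_multitask_labels_alt pvAltFrom pvBetterCol pvWorseCol pvPairs; rfl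
  rw [this]
  exact pvLoop_eq ls (-1) [] hpre
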